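-- pv_equiv track=rewrite | github.com/AlbinSmiley/bezoutPython | fun.py | yDe
-- ===== SOURCE A (Python) =====
-- def kaDe(n1, n2):
--     if n2 == 0: return [0]  # Éviter la division par zéro
--
--     restes = [n1, n2]
--     k = [0, 0]
--     i = 0
--     while restes[i + 1] != 0:
--         reste = restes[i] % restes[i + 1]
--         ka = restes[i] // restes[i + 1]
--         restes.append(reste)
--         k.append(ka)
--         i += 1
--     return k
--
-- def yDe(n1, n2):
--     k = kaDe(n1, n2)
--     if len(k) < 3: return []  # Gérer le cas où k est trop court
--
--     y = [0, 1]
--     for i in range(2, len(k) - 1):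
--         iy = y[i - 2] - k[i] * y[i - 1]
--         y.append(iy)
--     return y
-- ===== SOURCE B (Python) =====
-- def yDe(n1, n2):
--     if n2 == 0:
--         return []
--     y = [0, 1]
--     y_prev, y_cur = 0, 1
--     a, b = n1, n2
--     while True:
--         q, r = divmod(a, b)
--         if r == 0:
--             return y
--         y_new = y_prev - q * y_cur
--         y.append(y_new)
--         y_prev, y_cur = y_cur, y_new
--         a, b = b, r
-- ===== Notes on version B (the rewrite author's own statement) =====
-- stated objective: alternative
-- what changed: B replaces A's two-phase pipeline (kaDe builds the full quotient table, then a second pass indexes into it) with a single fused extended-Euclidean loop that carries only the last two y-coefficients and appends as it goes, never materialising the quotient or remainder lists.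
import Mathlib
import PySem

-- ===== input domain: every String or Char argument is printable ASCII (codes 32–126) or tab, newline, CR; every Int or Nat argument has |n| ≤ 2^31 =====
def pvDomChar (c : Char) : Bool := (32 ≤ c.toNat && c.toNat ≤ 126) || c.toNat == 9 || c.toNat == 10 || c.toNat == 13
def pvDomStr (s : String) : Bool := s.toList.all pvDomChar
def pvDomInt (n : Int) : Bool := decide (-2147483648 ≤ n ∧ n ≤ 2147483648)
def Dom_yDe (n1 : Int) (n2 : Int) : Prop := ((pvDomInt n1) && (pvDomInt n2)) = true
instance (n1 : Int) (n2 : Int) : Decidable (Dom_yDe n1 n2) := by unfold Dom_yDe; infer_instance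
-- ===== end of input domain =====

-- B fuses A's two-phase pipeline (full quotient table, then a second indexed pass) into one
-- extended-Euclidean loop carrying only the last two coefficients; objective: alternative decomposition.


-- Python's a % b has |a % b| < |b| for b ≠ 0 (sign of the divisor); drives both loops' termination.
theorem pvModAbsLt (a b : Int) (hb : b ≠ 0) :
    (PySem.Int.mod a b).natAbs < b.natAbs := by
  rcases lt_or_gt_of_ne hb with h | h
  · have := PySem.Int.mod_neg_bounds a h
    omega
  · have h1 := PySem.Int.mod_nonneg a h
    have h2 := PySem.Int.mod_lt a h
    omega

-- ===== PORT A =====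
-- A's while loop: i indexes the two most recent restes entries, carried here as a/b.
def kaDeLoop (a b : Int) (restes k : List Int) : List Int :=
  if hb : b = 0 then k
  else
    kaDeLoop b (PySem.Int.mod a b)
      (restes ++ [PySem.Int.mod a b]) (k ++ [PySem.Int.floordiv a b])
termination_by b.natAbs
decreasing_by exact pvModAbsLt a b hb

def kaDe (n1 : Int) (n2 : Int) : List Int :=
  if n2 = 0 then [0]
  else kaDeLoop n1 n2 [n1, n2] [0, 0]

def yDe (n1 : Int) (n2 : Int) : List Int :=
  let k := kaDe n1 n2
  if k.length < 3 then []
  else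
    (PySem.List.pyRange 2 ((k.length : Int) - 1) 1).foldl
      (fun y i =>
        y ++ [PySem.List.pyGetD y (i - 2) 0 - PySem.List.pyGetD k i 0 * PySem.List.pyGetD y (i - 1) 0])
      [0, 1]

-- ===== PORT B =====
-- B's while True loop; the b = 0 branch is only a totality guard (b ≠ 0 at every actual call).
def yDeAltLoop (a b : Int) (yPrev yCur : Int) (y : List Int) : List Int :=
  if hb : b = 0 then y
  else
    let q := PySem.Int.floordiv a b
    let r := PySem.Int.mod a b
    if r = 0 then y
    else yDeAltLoop b r yCur (yPrev - q * yCur) (y ++ [yPrev - q * yCur])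
termination_by b.natAbs
decreasing_by exact pvModAbsLt a b hb

def yDe_alt (n1 : Int) (n2 : Int) : List Int :=
  if n2 = 0 then []
  else yDeAltLoop n1 n2 0 1 [0, 1]

-- ===== PRECONDITION & SPEC =====
def Spec_yDe (n1 : Int) (n2 : Int) (out : List Int) : Prop := out = yDe_alt n1 n2
instance (n1 : Int) (n2 : Int) (out : List Int) : Decidable (Spec_yDe n1 n2 out) := by unfold Spec_yDe; infer_instance

-- ===== CLAIM (what is proved, stated in full; the proofs are below) =====
def Claim_equal_yDe : Prop := ∀ (n1 : Int) (n2 : Int), Dom_yDe n1 n2 → Spec_yDe n1 n2 (yDe n1 n2)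

-- ===== LEMMAS AND PROOFS =====

-- Proof-side: the quotient list of the Euclidean algorithm on (a, b).
def pvQs (a b : Int) : List Int :=
  if hb : b = 0 then []
  else PySem.Int.floordiv a b :: pvQs b (PySem.Int.mod a b)
termination_by b.natAbs
decreasing_by exact pvModAbsLt a b hb

-- Proof-side: B's recurrence run over an explicit quotient list.
def pvF (qs : List Int) (yPrev yCur : Int) (y : List Int) : List Int :=
  match qs with
  | [] => y
  | q :: qt => pvF qt yCur (yPrev - q * yCur) (y ++ [yPrev - q * yCur])

theorem pvQs_ne_nil (a b : Int) (hb : b ≠ 0) : pvQs a b ≠ [] := by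
  rw [pvQs]; simp [hb]

theorem kaDeLoop_eq (a b : Int) (restes k : List Int) :
    kaDeLoop a b restes k = k ++ pvQs a b := by
  by_cases hb : b = 0
  · rw [kaDeLoop, pvQs]; simp [hb]
  · rw [kaDeLoop, pvQs]
    simp only [hb, dite_false]
    rw [kaDeLoop_eq b (PySem.Int.mod a b)]
    simp
termination_by b.natAbs
decreasing_by exact pvModAbsLt a b hb

theorem yDeAltLoop_eq (a b : Int) (yPrev yCur : Int) (y : List Int) (hb : b ≠ 0) :
    yDeAltLoop a b yPrev yCur y = pvF (pvQs a b).dropLast yPrev yCur y := by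
  rw [yDeAltLoop, pvQs]
  simp only [hb, dite_false]
  by_cases hr : PySem.Int.mod a b = 0
  · rw [pvQs]
    simp [hr, pvF]
  · have hne := pvQs_ne_nil b (PySem.Int.mod a b) hr
    rw [List.dropLast_cons_of_ne_nil hne]
    simp only [hr, if_false, pvF]
    exact yDeAltLoop_eq b (PySem.Int.mod a b) yCur (yPrev - PySem.Int.floordiv a b * yCur) _ hr
termination_by b.natAbs
decreasing_by exact pvModAbsLt a b hb

-- A's second pass over indices 2 .. 2+|t|-1 of k = [0,0] ++ qs equals pvF on the pending quotients t,
-- provided y's last two elements are yPrev, yCur and the k-entries still to be read are exactly t.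
theorem pvFoldEq (k : List Int) (t : List Int) (y : List Int) (yPrev yCur : Int)
    (hlen : 2 ≤ y.length)
    (hp : y.getD (y.length - 2) 0 = yPrev)
    (hc : y.getD (y.length - 1) 0 = yCur)
    (hk : ∀ j (hj : j < t.length), k.getD (y.length + j) 0 = t[j]) :
    (PySem.List.pyRange (y.length : Int) ((y.length : Int) + t.length) 1).foldl
      (fun y i =>
        y ++ [PySem.List.pyGetD y (i - 2) 0 - PySem.List.pyGetD k i 0 * PySem.List.pyGetD y (i - 1) 0])
      y = pvF t yPrev yCur y := by
  induction t generalizing y yPrev yCur with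
  | nil => simp [pvF, PySem.List.pyRange_one_eq_nil]
  | cons q qt ih =>
    have hcons : (PySem.List.pyRange (y.length : Int) ((y.length : Int) + (q :: qt).length) 1)
        = (y.length : Int) :: PySem.List.pyRange ((y.length : Int) + 1) ((y.length : Int) + (q :: qt).length) 1 := by
      apply PySem.List.pyRange_one_cons; simp
    rw [hcons]
    simp only [List.foldl_cons]
    have hq : k.getD (y.length + 0) 0 = q := hk 0 (by simp)
    have e1 : PySem.List.pyGetD y ((y.length : Int) - 2) 0 = yPrev := by
      rw [show ((y.length : Int) - 2) = ((y.length - 2 : Nat) : Int) by omega,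
        PySem.List.pyGetD_natCast]; exact hp
    have e2 : PySem.List.pyGetD y ((y.length : Int) - 1) 0 = yCur := by
      rw [show ((y.length : Int) - 1) = ((y.length - 1 : Nat) : Int) by omega,
        PySem.List.pyGetD_natCast]; exact hc
    have e3 : PySem.List.pyGetD k (y.length : Int) 0 = q := by
      rw [PySem.List.pyGetD_natCast]; simpa using hq
    rw [e1, e2, e3]
    set y' := y ++ [yPrev - q * yCur] with hy'
    have hlen' : y'.length = y.length + 1 := by simp [hy']
    have := ih y' yCur (yPrev - q * yCur)
      (by omega)
      (by
        rw [hlen', show y.length + 1 - 2 = y.length - 1 by omega, hy']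
        rw [List.getD_append _ _ _ _ (by omega)]; exact hc)
      (by
        rw [hlen', show y.length + 1 - 1 = y.length by omega, hy']
        simp [List.getD])
      (by
        intro j hj
        have hkk := hk (j + 1) (by simpa using Nat.add_lt_add_right hj 1)
        rw [hlen', show y.length + 1 + j = y.length + (j + 1) by omega]
        simpa using hkk)
    have harg1 : ((y.length : Int) + 1) = (y'.length : Int) := by rw [hlen']; push_cast; ring
    have harg2 : ((y.length : Int) + ((q :: qt).length : Int)) = ((y'.length : Int) + (qt.length : Int)) := by
      rw [hlen']; simp only [List.length_cons]; push_cast; ring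
    rw [pvF, harg1, harg2, this]

theorem yDe_eq_pvF (n1 n2 : Int) (h2 : n2 ≠ 0) :
    yDe n1 n2 = pvF (pvQs n1 n2).dropLast 0 1 [0, 1] := by
  have hk : kaDe n1 n2 = [0, 0] ++ pvQs n1 n2 := by
    rw [kaDe]; simp only [h2, if_false]; exact kaDeLoop_eq n1 n2 _ _
  have hqs := pvQs_ne_nil n1 n2 h2
  have hqlen : 1 ≤ (pvQs n1 n2).length := List.length_pos_iff.mpr hqs
  rw [yDe]
  simp only [hk]
  rw [if_neg (by simp; omega)]
  have hlen : ([0, 0] ++ pvQs n1 n2).length = 2 + (pvQs n1 n2).length := by simp; omega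
  have hrange : (([0, 0] ++ pvQs n1 n2).length : Int) - 1
      = ((([0, 1] : List Int).length : Int) + ((pvQs n1 n2).dropLast).length) := by
    simp; omega
  rw [hrange]
  exact pvFoldEq ([0, 0] ++ pvQs n1 n2) (pvQs n1 n2).dropLast [0, 1] 0 1
    (by simp) (by simp) (by simp)
    (by
      intro j hj
      have hj' : j < (pvQs n1 n2).length := by
        simp only [List.length_dropLast] at hj; omega
      rw [show ([0, 1] : List Int).length + j = 2 + j by simp]
      rw [List.getD_append_right _ _ _ _ (by simp)]
      simp only [List.length_cons, List.length_nil]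
      rw [show 2 + j - 2 = j by omega]
      rw [List.getD_eq_getElem _ _ hj']
      exact (List.getElem_dropLast ..).symm)

-- ===== VERDICT (by name: the statement is the Claim_ definition above) =====
theorem yDe_spec : Claim_equal_yDe := by
  intro n1 n2 _
  unfold Spec_yDe
  by_cases h2 : n2 = 0
  · subst h2
    rw [yDe, yDe_alt, kaDe]
    simp
  · rw [yDe_alt]
    simp only [h2, if_false]
    rw [yDeAltLoop_eq n1 n2 0 1 [0, 1] h2]
    exact yDe_eq_pvF n1 n2 h2
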